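-- pv_equiv track=rewrite | github.com/Ravikumarchavva/cascadia-vlm-challenge | cluade-game.py | score_elk
-- ===== SOURCE A (Python) =====
-- from typing import List, Dict, Tuple, Optional
--
-- def _find_connected_components(
--     tile_indices: List[int],
--     adjacency: Dict[int, List[int]],
-- ) -> List[List[int]]:
--     """
--     Given a subset of tile indices and the full adjacency graph,
--     return connected components (groups of mutually-reachable tiles).
--     """
--     remaining = set(tile_indices)
--     components = []
--     while remaining:
--         start = next(iter(remaining))
--         # BFS
--         queue   = [start]
--         visited = {start}
--         while queue:
--             node = queue.pop(0)
--             for nb in adjacency.get(node, []):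
--                 if nb in remaining and nb not in visited:
--                     visited.add(nb)
--                     queue.append(nb)
--         components.append(sorted(visited))
--         remaining -= visited
--     return components
--
-- def score_elk(
--     animals: List[str],
--     adjacency: Dict[int, List[int]],
--     centroids: List[Tuple[int, int]],
-- ) -> int:
--     """
--     Roosevelt Elk: scores per group of elk in exact shape.
--     Card shows specific formations worth:
--         2 elk in specific shape → 5 pts
--         5 elk → 5 pts  (another formation)
--         9 elk → 13 pts
--     Each elk may only score for a single group.
--
--     NOTE: Full shape-template matching requires the exact hex-grid templates
--     from the card. This is a simplified version that scores connected groups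
--     using the point values from the card's size→score table.
--     """
--     # Simplified: score based on connected component size
--     # From the card layout: 2→5, 5→5, 9→13
--     ELK_SCORES = {2: 5, 5: 5, 9: 13}
--
--     elk_indices = [i for i, a in enumerate(animals) if a == "elk"]
--     if not elk_indices:
--         return 0
--
--     components = _find_connected_components(elk_indices, adjacency)
--     score = 0
--     for comp in components:
--         size = len(comp)
--         if size in ELK_SCORES:
--             score += ELK_SCORES[size]
--     return score
-- ===== SOURCE B (Python) =====
-- def score_elk(animals, adjacency, centroids):
--     """Union-find over the elk tiles instead of BFS component extraction."""
--     table = {2: 5, 5: 5, 9: 13}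
--     elk = [i for i, a in enumerate(animals) if a == "elk"]
--     parent = {i: i for i in elk}
--
--     def find(x):
--         while parent[x] != x:
--             x = parent[x]
--         return x
--
--     for i in elk:
--         for nb in adjacency.get(i, []):
--             if nb in parent:
--                 ri, rn = find(i), find(nb)
--                 if ri != rn:
--                     parent[rn] = ri
--
--     score = 0
--     for i in elk:
--         if find(i) == i:
--             size = sum(1 for j in elk if find(j) == i)
--             score += table.get(size, 0)
--     return score
-- ===== Notes on version B (the rewrite author's own statement) =====
-- stated objective: alternative
-- what changed: A extracts connected components by repeated BFS (list-queue with pop(0), per-component sorting, set differences) and then scores the component list; B does no graph traversal at all: it builds a union-find (disjoint-set forest) over the elk tiles by folding the adjacency lists into parent links, then scores each class at its root via the size->score table.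
-- outside the precondition, e.g. on score_elk(['elk', 'elk'], {1: [0]}, []): A returns 0, B returns 5
import Mathlib
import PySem

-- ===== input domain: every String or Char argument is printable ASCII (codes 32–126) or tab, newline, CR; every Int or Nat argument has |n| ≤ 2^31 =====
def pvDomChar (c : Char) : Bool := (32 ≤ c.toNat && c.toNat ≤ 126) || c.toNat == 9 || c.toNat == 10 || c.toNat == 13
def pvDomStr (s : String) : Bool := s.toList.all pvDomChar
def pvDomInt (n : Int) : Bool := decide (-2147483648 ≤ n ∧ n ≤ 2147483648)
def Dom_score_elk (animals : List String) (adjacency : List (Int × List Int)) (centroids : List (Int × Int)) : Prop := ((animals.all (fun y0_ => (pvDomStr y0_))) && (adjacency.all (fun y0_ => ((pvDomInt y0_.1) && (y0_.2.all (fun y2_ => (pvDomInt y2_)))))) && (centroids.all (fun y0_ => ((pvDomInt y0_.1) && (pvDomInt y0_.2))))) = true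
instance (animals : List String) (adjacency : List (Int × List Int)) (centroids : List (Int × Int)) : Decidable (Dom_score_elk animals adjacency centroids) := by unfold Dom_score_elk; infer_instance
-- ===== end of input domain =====

-- B replaces A's repeated-BFS component extraction (list queue with pop(0), per-component
-- sorting, set differences) by a union-find (disjoint-set forest) over the elk tiles: no
-- graph traversal, no visited set; classes are scored at their roots. Objective: alternative.
-- Both ports carry fuel arguments as pure totality guards (the proofs below show the chosen
-- fuel always suffices on the admitted inputs).

-- ===== PORT A =====
-- A's inner BFS (list used as queue, queue.pop(0) = take the head); fuel bounds the
-- number of iterations (each iteration pops one element, see pvBfsA_char below).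
def pvBfsA (adjacency : List (Int × List Int)) (remaining : List Int) :
    Nat → List Int → List Int → List Int
  | _, visited, [] => visited
  | 0, visited, _ :: _ => visited
  | fuel + 1, visited, node :: rest =>
    let s := (PySem.Dict.getD (⟨adjacency⟩ : PySem.Dict Int (List Int)) node []).foldl
      (fun (s : List Int × List Int) nb =>
        if nb ∈ remaining ∧ nb ∉ s.1 then (PySem.Set.add s.1 nb, s.2 ++ [nb]) else s)
      (visited, rest)
    pvBfsA adjacency remaining fuel s.1 s.2

-- A's `_find_connected_components`; Python's `start = next(iter(remaining))` is ported as
-- taking the head of the remaining list (valid on Pre_, see there); fuel bounds the number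
-- of components (each round removes at least the start tile).
def pvFindCCA (adjacency : List (Int × List Int)) : Nat → List Int → List (List Int)
  | _, [] => []
  | 0, _ :: _ => []
  | fuel + 1, start :: restR =>
    let visited := pvBfsA adjacency (start :: restR)
      (2 * (start :: restR).length + 1) [start] [start]
    PySem.List.sorted visited (fun x => x) false ::
      pvFindCCA adjacency fuel ((start :: restR).filter (fun x => decide (x ∉ visited)))

def score_elk (animals : List String) (adjacency : List (Int × List Int)) (centroids : List (Int × Int)) : Int :=
  let elkScores : PySem.Dict Int Int := ⟨[(2, 5), (5, 5), (9, 13)]⟩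
  let elk_indices := ((PySem.List.enumerate animals 0).filter (fun p => p.2 == "elk")).map (fun p => p.1)
  if elk_indices = [] then 0
  else
    let remaining := PySem.Set.ofList elk_indices
    let components := pvFindCCA adjacency remaining.length remaining
    components.foldl (fun score comp =>
      if elkScores.contains (comp.length : Int) then
        score + elkScores.getD (comp.length : Int) 0
      else score) 0

-- ===== PORT B =====
-- B's find: Python's `while parent[x] != x: x = parent[x]`; `parent[x]` is ported as
-- `getD p x x` — exact here because find is only reached with keys of parent (i ∈ elk,
-- nb guarded by `nb in parent`, and parent's values are keys). The fuel (always
-- |elk| + 1 below) is a pure totality guard: the proofs show parent chains are acyclic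
-- and shorter than the fuel, so the fuel-exhausted branch is never taken.
def pvFind (p : PySem.Dict Int Int) : Nat → Int → Int
  | 0, x => x
  | fuel + 1, x =>
    if PySem.Dict.getD p x x = x then x else pvFind p fuel (PySem.Dict.getD p x x)

-- B's union pass for one elk tile i: `for nb in adjacency.get(i, []): if nb in parent: …`
def pvUnionStep (adjacency : List (Int × List Int)) (n : Nat) (p : PySem.Dict Int Int) (i : Int) : PySem.Dict Int Int :=
  (PySem.Dict.getD (⟨adjacency⟩ : PySem.Dict Int (List Int)) i []).foldl
    (fun p nb =>
      if p.contains nb then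
        if pvFind p n i ≠ pvFind p n nb then p.insert (pvFind p n nb) (pvFind p n i) else p
      else p) p

def score_elk_alt (animals : List String) (adjacency : List (Int × List Int)) (centroids : List (Int × Int)) : Int :=
  let table : PySem.Dict Int Int := ⟨[(2, 5), (5, 5), (9, 13)]⟩
  let elk := ((PySem.List.enumerate animals 0).filter (fun p => p.2 == "elk")).map (fun p => p.1)
  let parent0 : PySem.Dict Int Int := elk.foldl (fun d i => d.insert i i) ⟨[]⟩
  let parent := elk.foldl (pvUnionStep adjacency (elk.length + 1)) parent0
  elk.foldl (fun score i =>
    if pvFind parent (elk.length + 1) i = i then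
      score + PySem.Dict.getD table ((elk.countP (fun j => pvFind parent (elk.length + 1) j == i)) : Int) 0
    else score) 0

-- ===== PRECONDITION & SPEC =====
def pvElkOf (animals : List String) : List Int :=
  ((PySem.List.enumerate animals 0).filter (fun p => p.2 == "elk")).map (fun p => p.1)

-- Pre_ excludes adjacency graphs that are not symmetric between elk tiles: there A's result
-- depends on CPython's set iteration order (`next(iter(remaining))` may start a BFS anywhere),
-- an accident of the implementation no port can reproduce; on symmetric graphs — the only shape
-- a hex-board adjacency ever takes — the result is start-order independent.
def Pre_score_elk (animals : List String) (adjacency : List (Int × List Int)) (centroids : List (Int × Int)) : Prop :=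
  ∀ i ∈ pvElkOf animals, ∀ j ∈ pvElkOf animals,
    j ∈ PySem.Dict.getD (⟨adjacency⟩ : PySem.Dict Int (List Int)) i [] →
    i ∈ PySem.Dict.getD (⟨adjacency⟩ : PySem.Dict Int (List Int)) j []
instance (animals : List String) (adjacency : List (Int × List Int)) (centroids : List (Int × Int)) : Decidable (Pre_score_elk animals adjacency centroids) := by unfold Pre_score_elk; infer_instance

def pvWitness_score_elk : List String × (List (Int × List Int)) × (List (Int × Int)) :=
  (["elk", "elk", "bear", "elk"], [((0 : Int), [(1 : Int), 2]), (1, [0]), (2, [0])], [])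

def Spec_score_elk (animals : List String) (adjacency : List (Int × List Int)) (centroids : List (Int × Int)) (out : Int) : Prop := out = score_elk_alt animals adjacency centroids
instance (animals : List String) (adjacency : List (Int × List Int)) (centroids : List (Int × Int)) (out : Int) : Decidable (Spec_score_elk animals adjacency centroids out) := by unfold Spec_score_elk; infer_instance

-- ===== CLAIM (what is proved, stated in full; the proofs are below) =====
def Claim_equal_score_elk : Prop := ∀ (animals : List String) (adjacency : List (Int × List Int)) (centroids : List (Int × Int)), Dom_score_elk animals adjacency centroids → Pre_score_elk animals adjacency centroids → Spec_score_elk animals adjacency centroids (score_elk animals adjacency centroids)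

-- ===== LEMMAS AND PROOFS =====

theorem pvCountP_add_le (G v : List Int) (nb : Int) :
    G.countP (fun x => decide (x ∉ PySem.Set.add v nb)) ≤ G.countP (fun x => decide (x ∉ v)) :=
  List.countP_mono_left (by
    intro a _ ha
    simp only [decide_eq_true_eq] at *
    rw [PySem.Set.mem_add] at ha
    tauto)

theorem pvCountP_add_lt (G v : List Int) (nb : Int) (hG : nb ∈ G) (hv : nb ∉ v) :
    G.countP (fun x => decide (x ∉ PySem.Set.add v nb)) + 1 ≤ G.countP (fun x => decide (x ∉ v)) := by
  induction G with
  | nil => simp at hG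
  | cons g G ih =>
    rw [List.countP_cons, List.countP_cons]
    by_cases hg : g = nb
    · subst hg
      have h1 : (decide (g ∉ PySem.Set.add v g)) = false := by
        simp [PySem.Set.mem_add]
      have h2 : (decide (g ∉ v)) = true := by simpa using hv
      rw [h1, h2]
      have := pvCountP_add_le G v g
      simp only [if_true, Bool.false_eq_true, if_false]
      omega
    · have heq : (decide (g ∉ PySem.Set.add v nb)) = (decide (g ∉ v)) := by
        simp [PySem.Set.mem_add, hg]
      rw [heq]
      rcases List.mem_cons.mp hG with h | h
      · exact absurd h.symm hg
      · have := ih h; omega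

-- The shape of A's inner neighbour loop: what ends up in visited, what ends up in the
-- queue, Nodup preservation, the length balance, and the loop measure
-- (2·|G not yet visited| + queue length) not increasing.
theorem pvFoldStep (G : List Int) (push : List Int → Int → List Int)
    (hl : ∀ q x, (push q x).length = q.length + 1)
    (hm : ∀ q x y, y ∈ push q x ↔ y = x ∨ y ∈ q) (ns : List Int) (v q : List Int) :
    (∀ x, x ∈ (ns.foldl (fun (s : List Int × List Int) nb =>
        if nb ∈ G ∧ nb ∉ s.1 then (PySem.Set.add s.1 nb, push s.2 nb) else s) (v, q)).1 ↔
        x ∈ v ∨ (x ∈ ns ∧ x ∈ G)) ∧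
    (∀ x, x ∈ (ns.foldl (fun (s : List Int × List Int) nb =>
        if nb ∈ G ∧ nb ∉ s.1 then (PySem.Set.add s.1 nb, push s.2 nb) else s) (v, q)).2 ↔
        x ∈ q ∨ (x ∈ (ns.foldl (fun (s : List Int × List Int) nb =>
        if nb ∈ G ∧ nb ∉ s.1 then (PySem.Set.add s.1 nb, push s.2 nb) else s) (v, q)).1 ∧ x ∉ v)) ∧
    (v.Nodup → (ns.foldl (fun (s : List Int × List Int) nb =>
        if nb ∈ G ∧ nb ∉ s.1 then (PySem.Set.add s.1 nb, push s.2 nb) else s) (v, q)).1.Nodup) ∧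
    ((ns.foldl (fun (s : List Int × List Int) nb =>
        if nb ∈ G ∧ nb ∉ s.1 then (PySem.Set.add s.1 nb, push s.2 nb) else s) (v, q)).1.length + q.length =
      v.length + (ns.foldl (fun (s : List Int × List Int) nb =>
        if nb ∈ G ∧ nb ∉ s.1 then (PySem.Set.add s.1 nb, push s.2 nb) else s) (v, q)).2.length) ∧
    (2 * G.countP (fun x => decide (x ∉ (ns.foldl (fun (s : List Int × List Int) nb =>
        if nb ∈ G ∧ nb ∉ s.1 then (PySem.Set.add s.1 nb, push s.2 nb) else s) (v, q)).1)) +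
      (ns.foldl (fun (s : List Int × List Int) nb =>
        if nb ∈ G ∧ nb ∉ s.1 then (PySem.Set.add s.1 nb, push s.2 nb) else s) (v, q)).2.length ≤
      2 * G.countP (fun x => decide (x ∉ v)) + q.length) := by
  induction ns generalizing v q with
  | nil =>
    refine ⟨by simp, by simp, fun h => h, by simp, le_refl _⟩
  | cons nb ns ih =>
    simp only [List.foldl_cons]
    by_cases h : nb ∈ G ∧ nb ∉ v
    · rw [if_pos h]
      obtain ⟨ia, ib, ic, id, ie⟩ := ih (PySem.Set.add v nb) (push q nb)
      have hadd : PySem.Set.add v nb = v ++ [nb] := by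
        simp [PySem.Set.add, h.2]
      refine ⟨?_, ?_, ?_, ?_, ?_⟩
      · intro x
        rw [ia x, PySem.Set.mem_add]
        simp only [List.mem_cons]
        constructor
        · rintro ((hx | rfl) | ⟨hx1, hx2⟩) <;> tauto
        · rintro (hx | ⟨(rfl | hx1), hx2⟩) <;> tauto
      · intro x
        have hnbR : nb ∈ (ns.foldl (fun (s : List Int × List Int) nb =>
            if nb ∈ G ∧ nb ∉ s.1 then (PySem.Set.add s.1 nb, push s.2 nb) else s)
            (PySem.Set.add v nb, push q nb)).1 :=
          (ia nb).mpr (Or.inl ((PySem.Set.mem_add v nb nb).mpr (Or.inr rfl)))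
        rw [ib x, hm, PySem.Set.mem_add]
        by_cases hxnb : x = nb
        · subst hxnb; constructor <;> intro <;> tauto
        · constructor
          · rintro ((rfl | hx) | ⟨hx1, hx2⟩) <;> tauto
          · rintro (hx | ⟨hx1, hx2⟩) <;> tauto
      · intro hnd
        exact ic (PySem.Set.nodup_add v nb hnd)
      · have h1 : (PySem.Set.add v nb).length = v.length + 1 := by simp [hadd]
        have h2 : (push q nb).length = q.length + 1 := hl q nb
        omega
      · have h1 := pvCountP_add_lt G v nb h.1 h.2
        have h2 : (push q nb).length = q.length + 1 := hl q nb
        omega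
    · rw [if_neg h]
      obtain ⟨ia, ib, ic, id, ie⟩ := ih v q
      refine ⟨?_, ib, ic, id, ie⟩
      intro x
      rw [ia x]
      simp only [List.mem_cons]
      constructor
      · rintro (hx | ⟨hx1, hx2⟩) <;> tauto
      · rintro (hx | ⟨(rfl | hx1), hx2⟩) <;> tauto

-- neighbours of x in the adjacency dict
def pvNbrs (adjacency : List (Int × List Int)) (x : Int) : List Int :=
  PySem.Dict.getD (⟨adjacency⟩ : PySem.Dict Int (List Int)) x []

-- one step inside G avoiding the blocked set B, and its reflexive-transitive closure
def pvRel (adjacency : List (Int × List Int)) (G B : List Int) (a b : Int) : Prop :=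
  b ∈ pvNbrs adjacency a ∧ b ∈ G ∧ b ∉ B
def pvReach (adjacency : List (Int × List Int)) (G B : List Int) (s x : Int) : Prop :=
  Relation.ReflTransGen (pvRel adjacency G B) s x

theorem pvReach_mem (adjacency : List (Int × List Int)) (G : List Int) (s x : Int)
    (hs : s ∈ G) (h : pvReach adjacency G [] s x) : x ∈ G := by
  induction h with
  | refl => exact hs
  | tail h₁ h₂ ih => exact h₂.2.1

theorem pvReach_symm (adjacency : List (Int × List Int)) (G : List Int)
    (hsym : ∀ a b, a ∈ G → pvRel adjacency G [] a b → pvRel adjacency G [] b a)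
    (s x : Int) (hs : s ∈ G) (h : pvReach adjacency G [] s x) : pvReach adjacency G [] x s := by
  induction h with
  | refl => exact Relation.ReflTransGen.refl
  | tail h₁ h₂ ih =>
    have hz : _ ∈ G := pvReach_mem adjacency G s _ hs h₁
    exact Relation.ReflTransGen.trans
      (Relation.ReflTransGen.single (hsym _ _ hz h₂)) ih

-- the worklist invariant characterisation of A's BFS (the fuel hypothesis also shows the
-- fuel-exhausted branch is never taken)
theorem pvBfsA_char (adjacency : List (Int × List Int)) (G B : List Int) (st : Int) :
    ∀ fuel visited queue,
    2 * G.countP (fun x => decide (x ∉ visited)) + queue.length ≤ fuel →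
    visited.Nodup → (∀ x ∈ queue, x ∈ visited) → st ∈ visited →
    (∀ x ∈ B, x ∈ visited) → (∀ x ∈ B, x ∉ queue) →
    (∀ x ∈ visited, x ∈ B ∨ pvReach adjacency G B st x) →
    (∀ x ∈ visited, x ∉ queue → ∀ nb ∈ pvNbrs adjacency x, nb ∈ G → nb ∈ visited) →
    (pvBfsA adjacency G fuel visited queue).Nodup ∧
      (∀ x, x ∈ pvBfsA adjacency G fuel visited queue ↔ x ∈ B ∨ pvReach adjacency G B st x) := by
  intro fuel
  induction fuel with
  | zero =>
    intro v queue hfuel hnd hq hsv hBv hBq hreach hclosed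
    cases queue with
    | cons node rest =>
      exfalso
      simp only [List.length_cons] at hfuel
      omega
    | nil =>
      refine ⟨hnd, fun x => ⟨fun hx => hreach x hx, fun hx => ?_⟩⟩
      rcases hx with hx | hx
      · exact hBv x hx
      · induction hx with
        | refl => exact hsv
        | tail h₁ h₂ ih => exact hclosed _ ih (by simp) _ h₂.1 h₂.2.1
  | succ fuel ih =>
    intro v queue hfuel hnd hq hsv hBv hBq hreach hclosed
    cases queue with
    | nil =>
      refine ⟨hnd, fun x => ⟨fun hx => hreach x hx, fun hx => ?_⟩⟩
      rcases hx with hx | hx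
      · exact hBv x hx
      · induction hx with
        | refl => exact hsv
        | tail h₁ h₂ ih' => exact hclosed _ ih' (by simp) _ h₂.1 h₂.2.1
    | cons node rest =>
      simp only [pvBfsA]
      have hf := pvFoldStep G (fun q x => q ++ [x]) (by simp) (by simp [or_comm])
        (PySem.Dict.getD (⟨adjacency⟩ : PySem.Dict Int (List Int)) node []) v rest
      obtain ⟨ia, ib, ic, _, ie⟩ := hf
      have hnodev : node ∈ v := hq node (by simp)
      have hnodeB : node ∉ B := fun h => hBq node h (by simp)
      have hnodeR : pvReach adjacency G B st node := by
        rcases hreach node hnodev with h | h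
        · exact absurd h hnodeB
        · exact h
      apply ih
      · exact le_trans ie (by simp only [List.length_cons] at hfuel; omega)
      · exact ic hnd
      · intro x hx
        rcases (ib x).mp hx with hx' | hx'
        · exact (ia x).mpr (Or.inl (hq x (List.mem_cons_of_mem _ hx')))
        · exact hx'.1
      · exact (ia st).mpr (Or.inl hsv)
      · exact fun x hx => (ia x).mpr (Or.inl (hBv x hx))
      · intro x hx hmem
        rcases (ib x).mp hmem with hx' | hx'
        · exact hBq x hx (List.mem_cons_of_mem _ hx')
        · exact hx'.2 (hBv x hx)
      · intro x hx
        rcases (ia x).mp hx with hx' | ⟨hx1, hx2⟩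
        · exact hreach x hx'
        · by_cases hxB : x ∈ B
          · exact Or.inl hxB
          · exact Or.inr (Relation.ReflTransGen.tail hnodeR ⟨hx1, hx2, hxB⟩)
      · intro x hx hxq nb hnb1 hnb2
        by_cases hxv : x ∈ v
        · by_cases hxnode : x = node
          · subst hxnode
            exact (ia nb).mpr (Or.inr ⟨hnb1, hnb2⟩)
          · have hxrest : x ∉ rest := fun hr => hxq ((ib x).mpr (Or.inl hr))
            have : x ∉ node :: rest := by simp [hxnode, hxrest]
            exact (ia nb).mpr (Or.inl (hclosed x hxv this nb hnb1 hnb2))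
        · exfalso
          exact hxq ((ib x).mpr (Or.inr ⟨hx, hxv⟩))

-- ---------- union-find infrastructure (B's side) ----------

-- the parent function read off the dict (parent[x], exact on keys; the default x is
-- never read off a key, see the invariant)
def pfD (p : PySem.Dict Int Int) (x : Int) : Int := PySem.Dict.getD p x x

-- the union-find invariant: keys are exactly E, parents stay in E, every node is
-- reachable-connected to its parent, and h witnesses acyclicity of the parent forest
def UFInv (adjacency : List (Int × List Int)) (E : List Int) (p : PySem.Dict Int Int) (h : Int → Nat) : Prop :=
  (∀ x : Int, p.contains x = true ↔ x ∈ E) ∧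
  (∀ x ∈ E, pfD p x ∈ E) ∧
  (∀ x ∈ E, pvReach adjacency E [] x (pfD p x)) ∧
  (∀ x ∈ E, pfD p x ≠ x → h (pfD p x) < h x)

-- the find measure: how many nodes of E lie strictly below x in the acyclicity ranking
def pvM (E : List Int) (h : Int → Nat) (x : Int) : Nat :=
  E.countP (fun y => decide (h y < h x))

-- the root of x, find with the canonical fuel
def pvRoot (p : PySem.Dict Int Int) (E : List Int) (x : Int) : Int :=
  pvFind p (E.length + 1) x

theorem pvCountP_lt_of (l : List Int) (pb qb : Int → Bool) (a : Int)
    (ha : a ∈ l) (hpa : pb a = false) (hqa : qb a = true)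
    (himp : ∀ x ∈ l, pb x = true → qb x = true) :
    l.countP pb < l.countP qb := by
  induction l with
  | nil => simp at ha
  | cons g t ih =>
    rw [List.countP_cons, List.countP_cons]
    rcases List.mem_cons.mp ha with rfl | hat
    · rw [hpa, hqa]
      have := List.countP_mono_left (l := t)
        (p := pb) (q := qb) (fun x hx => by
          intro hp
          exact himp x (List.mem_cons_of_mem _ hx) hp)
      simp only [if_true, Bool.false_eq_true, if_false]
      omega
    · have := ih hat (fun x hx => himp x (List.mem_cons_of_mem _ hx))
      by_cases hg : pb g = true
      · rw [hg, himp g (by simp) hg]; omega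
      · simp only [Bool.not_eq_true] at hg
        rw [hg]
        by_cases hq : qb g = true <;> simp [hq] <;> omega

theorem pvM_lt (E : List Int) (h : Int → Nat) (p : PySem.Dict Int Int) (x : Int)
    (hx : x ∈ E) (hmemE : pfD p x ∈ E) (hdec : h (pfD p x) < h x) :
    pvM E h (pfD p x) < pvM E h x := by
  apply pvCountP_lt_of E _ _ (pfD p x) hmemE
  · simp
  · simpa using hdec
  · intro y _ hy
    simp only [decide_eq_true_eq] at *
    omega

theorem pvM_le (E : List Int) (h : Int → Nat) (x : Int) : pvM E h x ≤ E.length :=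
  List.countP_le_length

theorem pvFind_spec (adjacency : List (Int × List Int)) (E : List Int)
    (p : PySem.Dict Int Int) (h : Int → Nat)
    (I1 : ∀ x ∈ E, pfD p x ∈ E)
    (I2 : ∀ x ∈ E, pvReach adjacency E [] x (pfD p x))
    (I3 : ∀ x ∈ E, pfD p x ≠ x → h (pfD p x) < h x) :
    ∀ fuel x, x ∈ E → pvM E h x < fuel →
      pvFind p fuel x ∈ E ∧ pfD p (pvFind p fuel x) = pvFind p fuel x ∧
        pvReach adjacency E [] x (pvFind p fuel x) := by
  intro fuel
  induction fuel with
  | zero => intro x _ hf; omega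
  | succ fuel ih =>
    intro x hx hf
    by_cases hfix : pfD p x = x
    · simp only [pvFind, pfD] at hfix ⊢
      rw [if_pos hfix]
      exact ⟨hx, hfix, Relation.ReflTransGen.refl⟩
    · have hpx : pfD p x ∈ E := I1 x hx
      have hm : pvM E h (pfD p x) < fuel := by
        have := pvM_lt E h p x hx hpx (I3 x hx hfix)
        omega
      obtain ⟨a, b, c⟩ := ih (pfD p x) hpx hm
      simp only [pvFind, pfD] at hfix ⊢
      rw [if_neg hfix]
      exact ⟨a, b, Relation.ReflTransGen.trans (I2 x hx) c⟩

theorem pvFind_fuel (E : List Int) (p : PySem.Dict Int Int) (h : Int → Nat)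
    (I1 : ∀ x ∈ E, pfD p x ∈ E)
    (I3 : ∀ x ∈ E, pfD p x ≠ x → h (pfD p x) < h x) :
    ∀ f1 f2 x, x ∈ E → pvM E h x < f1 → pvM E h x < f2 →
      pvFind p f1 x = pvFind p f2 x := by
  intro f1
  induction f1 with
  | zero => intro f2 x _ hf _; omega
  | succ f1 ih =>
    intro f2 x hx hf1 hf2
    cases f2 with
    | zero => omega
    | succ f2 =>
      by_cases hfix : pfD p x = x
      · simp only [pvFind, pfD] at hfix ⊢
        rw [if_pos hfix, if_pos hfix]
      · have hpx : pfD p x ∈ E := I1 x hx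
        have hm : pvM E h (pfD p x) < pvM E h x :=
          pvM_lt E h p x hx hpx (I3 x hx hfix)
        simp only [pvFind, pfD] at hfix ⊢
        rw [if_neg hfix, if_neg hfix]
        exact ih f2 (pfD p x) hpx (by omega) (by omega)

theorem pvRoot_fix (E : List Int) (p : PySem.Dict Int Int) (x : Int)
    (hfix : pfD p x = x) : pvRoot p E x = x := by
  simp only [pvRoot, pvFind, pfD] at hfix ⊢
  rw [if_pos hfix]

theorem pvRoot_step (E : List Int) (p : PySem.Dict Int Int) (h : Int → Nat)
    (I1 : ∀ x ∈ E, pfD p x ∈ E)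
    (I3 : ∀ x ∈ E, pfD p x ≠ x → h (pfD p x) < h x)
    (x : Int) (hx : x ∈ E) (hfix : pfD p x ≠ x) :
    pvRoot p E x = pvRoot p E (pfD p x) := by
  have hpx : pfD p x ∈ E := I1 x hx
  have hm : pvM E h (pfD p x) < pvM E h x := pvM_lt E h p x hx hpx (I3 x hx hfix)
  have hle := pvM_le E h x
  have h1 : pvRoot p E x = pvFind p E.length (pfD p x) := by
    simp only [pvRoot, pvFind, pfD] at hfix ⊢
    rw [if_neg hfix]
  rw [h1, pvRoot]
  exact pvFind_fuel E p h I1 I3 E.length (E.length + 1) (pfD p x) hpx (by omega) (by omega)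

-- ROOT-UPDATE: inserting ri as the parent of the root rn reparents exactly the class of rn
theorem pvRoot_insert (E : List Int) (p : PySem.Dict Int Int) (h : Int → Nat)
    (I1 : ∀ x ∈ E, pfD p x ∈ E)
    (I3 : ∀ x ∈ E, pfD p x ≠ x → h (pfD p x) < h x)
    (rn ri : Int) (hrn : rn ∈ E) (hri : ri ∈ E)
    (hrnfix : pfD p rn = rn) (hrifix : pfD p ri = ri) (hne : rn ≠ ri) :
    (∀ x, pfD (p.insert rn ri) x = if x = rn then ri else pfD p x) ∧
    (∀ x ∈ E, pfD (p.insert rn ri) x ∈ E) ∧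
    (∀ x ∈ E, pfD (p.insert rn ri) x ≠ x →
      (fun y => if pvRoot p E y = rn then h y + h ri + 1 else h y) (pfD (p.insert rn ri) x) <
      (fun y => if pvRoot p E y = rn then h y + h ri + 1 else h y) x) ∧
    (∀ x ∈ E, pvRoot (p.insert rn ri) E x = if pvRoot p E x = rn then ri else pvRoot p E x) := by
  have hirn : ri ≠ rn := fun e => hne e.symm
  have ha : ∀ x, pfD (p.insert rn ri) x = if x = rn then ri else pfD p x := by
    intro x
    simp only [pfD, PySem.Dict.getD_insert]
  have hb : ∀ x ∈ E, pfD (p.insert rn ri) x ∈ E := by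
    intro x hx
    rw [ha]
    split_ifs with hxe
    · exact hri
    · exact I1 x hx
  have hrootrn : pvRoot p E rn = rn := pvRoot_fix E p rn hrnfix
  have hrootri : pvRoot p E ri = ri := pvRoot_fix E p ri hrifix
  have hc : ∀ x ∈ E, pfD (p.insert rn ri) x ≠ x →
      (fun y => if pvRoot p E y = rn then h y + h ri + 1 else h y) (pfD (p.insert rn ri) x) <
      (fun y => if pvRoot p E y = rn then h y + h ri + 1 else h y) x := by
    intro x hx hne'
    simp only []
    by_cases hxrn : x = rn
    · subst hxrn
      rw [ha, if_pos rfl] at hne'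
      rw [ha, if_pos rfl, hrootri, if_neg hirn, hrootrn, if_pos rfl]
      omega
    · rw [ha, if_neg hxrn] at hne' ⊢
      have hdec := I3 x hx hne'
      have hre : pvRoot p E x = pvRoot p E (pfD p x) := pvRoot_step E p h I1 I3 x hx hne'
      rw [← hre]
      split_ifs with hcc
      · omega
      · omega
  have key : ∀ N, ∀ x ∈ E, pvM E h x ≤ N →
      pvRoot (p.insert rn ri) E x = if pvRoot p E x = rn then ri else pvRoot p E x := by
    intro N
    induction N with
    | zero =>
      intro x hx hN
      by_cases hfix : pfD p x = x
      · by_cases hxrn : x = rn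
        · subst hxrn
          have h1 : pfD (p.insert x ri) x = ri := by rw [ha, if_pos rfl]
          have h2 : pvRoot (p.insert x ri) E x = pvRoot (p.insert x ri) E ri := by
            have := pvRoot_step E (p.insert x ri)
              (fun y => if pvRoot p E y = x then h y + h ri + 1 else h y) hb hc x hrn
              (by rw [h1]; exact hirn)
            rw [h1] at this
            exact this
          have h3 : pvRoot (p.insert x ri) E ri = ri :=
            pvRoot_fix E (p.insert x ri) ri (by rw [ha, if_neg hirn]; exact hrifix)
          rw [h2, h3, hrootrn, if_pos rfl]
        · have h1 : pfD (p.insert rn ri) x = x := by rw [ha, if_neg hxrn]; exact hfix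
          rw [pvRoot_fix E (p.insert rn ri) x h1, pvRoot_fix E p x hfix, if_neg hxrn]
      · exfalso
        have := pvM_lt E h p x hx (I1 x hx) (I3 x hx hfix)
        omega
    | succ N ih =>
      intro x hx hN
      by_cases hfix : pfD p x = x
      · by_cases hxrn : x = rn
        · subst hxrn
          have h1 : pfD (p.insert x ri) x = ri := by rw [ha, if_pos rfl]
          have h2 : pvRoot (p.insert x ri) E x = pvRoot (p.insert x ri) E ri := by
            have := pvRoot_step E (p.insert x ri)
              (fun y => if pvRoot p E y = x then h y + h ri + 1 else h y) hb hc x hrn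
              (by rw [h1]; exact hirn)
            rw [h1] at this
            exact this
          have h3 : pvRoot (p.insert x ri) E ri = ri :=
            pvRoot_fix E (p.insert x ri) ri (by rw [ha, if_neg hirn]; exact hrifix)
          rw [h2, h3, hrootrn, if_pos rfl]
        · have h1 : pfD (p.insert rn ri) x = x := by rw [ha, if_neg hxrn]; exact hfix
          rw [pvRoot_fix E (p.insert rn ri) x h1, pvRoot_fix E p x hfix, if_neg hxrn]
      · have hxrn : x ≠ rn := fun e => hfix (by rw [e]; exact hrnfix)
        have hstep' : pfD (p.insert rn ri) x = pfD p x := by rw [ha, if_neg hxrn]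
        have h2 : pvRoot (p.insert rn ri) E x = pvRoot (p.insert rn ri) E (pfD p x) := by
          have := pvRoot_step E (p.insert rn ri)
            (fun y => if pvRoot p E y = rn then h y + h ri + 1 else h y) hb hc x hx
            (by rw [hstep']; exact hfix)
          rw [hstep'] at this
          exact this
        have hmlt := pvM_lt E h p x hx (I1 x hx) (I3 x hx hfix)
        rw [h2, ih (pfD p x) (I1 x hx) (by omega), pvRoot_step E p h I1 I3 x hx hfix]
  exact ⟨ha, hb, hc, fun x hx => key (pvM E h x) x hx le_rfl⟩

-- preservation of the invariant and growth of the processed-edge relation along B's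
-- inner union loop over the neighbour list of one elk tile
theorem pvUnionInner (adjacency : List (Int × List Int)) (E : List Int)
    (hsym : ∀ a b, a ∈ E → pvRel adjacency E [] a b → pvRel adjacency E [] b a)
    (i : Int) (hi : i ∈ E) :
    ∀ (ns : List Int), (∀ nb ∈ ns, nb ∈ pvNbrs adjacency i) →
    ∀ (p : PySem.Dict Int Int) (h : Int → Nat), UFInv adjacency E p h →
    ∃ h', UFInv adjacency E
        (ns.foldl (fun p nb =>
          if p.contains nb then
            if pvFind p (E.length + 1) i ≠ pvFind p (E.length + 1) nb then
              p.insert (pvFind p (E.length + 1) nb) (pvFind p (E.length + 1) i) else p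
          else p) p) h' ∧
      (∀ x ∈ E, ∀ y ∈ E, pvRoot p E x = pvRoot p E y →
        pvRoot (ns.foldl (fun p nb =>
          if p.contains nb then
            if pvFind p (E.length + 1) i ≠ pvFind p (E.length + 1) nb then
              p.insert (pvFind p (E.length + 1) nb) (pvFind p (E.length + 1) i) else p
          else p) p) E x =
        pvRoot (ns.foldl (fun p nb =>
          if p.contains nb then
            if pvFind p (E.length + 1) i ≠ pvFind p (E.length + 1) nb then
              p.insert (pvFind p (E.length + 1) nb) (pvFind p (E.length + 1) i) else p
          else p) p) E y) ∧
      (∀ nb ∈ ns, nb ∈ E →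
        pvRoot (ns.foldl (fun p nb =>
          if p.contains nb then
            if pvFind p (E.length + 1) i ≠ pvFind p (E.length + 1) nb then
              p.insert (pvFind p (E.length + 1) nb) (pvFind p (E.length + 1) i) else p
          else p) p) E i =
        pvRoot (ns.foldl (fun p nb =>
          if p.contains nb then
            if pvFind p (E.length + 1) i ≠ pvFind p (E.length + 1) nb then
              p.insert (pvFind p (E.length + 1) nb) (pvFind p (E.length + 1) i) else p
          else p) p) E nb) := by
  intro ns
  induction ns with
  | nil =>
    intro _ p h hInv
    exact ⟨h, hInv, fun x _ y _ hxy => hxy, by simp⟩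
  | cons nb ns ih =>
    intro hns p h hInv
    obtain ⟨K, I1, I2, I3⟩ := hInv
    rw [List.foldl_cons]
    by_cases hcont : p.contains nb = true
    · rw [if_pos hcont]
      have hnbE : nb ∈ E := (K nb).mp hcont
      have hiM : pvM E h i < E.length + 1 := by have := pvM_le E h i; omega
      have hnbM : pvM E h nb < E.length + 1 := by have := pvM_le E h nb; omega
      obtain ⟨hriE, hrifix, hRiri⟩ :=
        pvFind_spec adjacency E p h I1 I2 I3 (E.length + 1) i hi hiM
      obtain ⟨hrnE, hrnfix, hRnbrn⟩ :=
        pvFind_spec adjacency E p h I1 I2 I3 (E.length + 1) nb hnbE hnbM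
      by_cases hrne : pvFind p (E.length + 1) i ≠ pvFind p (E.length + 1) nb
      · rw [if_pos hrne]
        have hne' : pvFind p (E.length + 1) nb ≠ pvFind p (E.length + 1) i :=
          fun e => hrne e.symm
        have hRrnri : pvReach adjacency E [] (pvFind p (E.length + 1) nb)
            (pvFind p (E.length + 1) i) := by
          have hRrnnb : pvReach adjacency E [] (pvFind p (E.length + 1) nb) nb :=
            pvReach_symm adjacency E hsym nb _ hnbE hRnbrn
          have hRnbi : pvReach adjacency E [] nb i :=
            pvReach_symm adjacency E hsym i nb hi
              (Relation.ReflTransGen.single ⟨hns nb (by simp), hnbE, by simp⟩)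
          exact Relation.ReflTransGen.trans hRrnnb
            (Relation.ReflTransGen.trans hRnbi hRiri)
      -- the reparented dict and its invariant
        obtain ⟨ha, hb, hc, hd⟩ := pvRoot_insert E p h I1 I3
          (pvFind p (E.length + 1) nb) (pvFind p (E.length + 1) i)
          hrnE hriE hrnfix hrifix hne'
        have K' : ∀ x : Int,
            ((p.insert (pvFind p (E.length + 1) nb) (pvFind p (E.length + 1) i)).contains x = true ↔ x ∈ E) := by
          intro x
          rw [PySem.Dict.contains_insert]
          constructor
          · intro hx
            rcases Bool.or_eq_true_iff.mp hx with hx | hx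
            · exact (beq_iff_eq.mp hx) ▸ hrnE
            · exact (K x).mp hx
          · intro hx
            rcases eq_or_ne x (pvFind p (E.length + 1) nb) with rfl | hne2
            · simp
            · simp only [Bool.or_eq_true_iff]
              exact Or.inr ((K x).mpr hx)
        have I2' : ∀ x ∈ E, pvReach adjacency E [] x
            (pfD (p.insert (pvFind p (E.length + 1) nb) (pvFind p (E.length + 1) i)) x) := by
          intro x hx
          rw [ha]
          split_ifs with hxe
          · exact hxe ▸ hRrnri
          · exact I2 x hx
        obtain ⟨h'', inv2, mono2, edges2⟩ := ih (fun y hy => hns y (by simp [hy]))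
          (p.insert (pvFind p (E.length + 1) nb) (pvFind p (E.length + 1) i))
          (fun y => if pvRoot p E y = pvFind p (E.length + 1) nb then
            h y + h (pvFind p (E.length + 1) i) + 1 else h y)
          ⟨K', hb, I2', hc⟩
        refine ⟨h'', inv2, ?_, ?_⟩
        · intro x hx y hy hxy
          apply mono2 x hx y hy
          rw [hd x hx, hd y hy]
          have : pvRoot p E x = pvRoot p E y := hxy
          rw [this]
        · intro nb' hnb' hnb'E
          rcases List.mem_cons.mp hnb' with rfl | hmem
          · apply mono2 i hi nb' hnb'E
            rw [hd i hi, hd nb' hnb'E]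
            have e1 : pvRoot p E i = pvFind p (E.length + 1) i := rfl
            have e2 : pvRoot p E nb' = pvFind p (E.length + 1) nb' := rfl
            rw [e1, e2, if_neg hrne, if_pos rfl]
          · exact edges2 nb' hmem hnb'E
      · rw [if_neg hrne]
        have heq : pvRoot p E i = pvRoot p E nb := not_ne_iff.mp hrne
        obtain ⟨h'', inv2, mono2, edges2⟩ := ih (fun y hy => hns y (by simp [hy])) p h
          ⟨K, I1, I2, I3⟩
        refine ⟨h'', inv2, mono2, ?_⟩
        intro nb' hnb' hnb'E
        rcases List.mem_cons.mp hnb' with rfl | hmem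
        · exact mono2 i hi nb' hnb'E heq
        · exact edges2 nb' hmem hnb'E
    · rw [if_neg hcont]
      have hnbE : nb ∉ E := fun hx => hcont ((K nb).mpr hx)
      obtain ⟨h'', inv2, mono2, edges2⟩ := ih (fun y hy => hns y (by simp [hy])) p h
        ⟨K, I1, I2, I3⟩
      refine ⟨h'', inv2, mono2, ?_⟩
      intro nb' hnb' hnb'E
      rcases List.mem_cons.mp hnb' with rfl | hmem
      · exact absurd hnb'E hnbE
      · exact edges2 nb' hmem hnb'E

theorem pvUnionOuter (adjacency : List (Int × List Int)) (E : List Int)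
    (hsym : ∀ a b, a ∈ E → pvRel adjacency E [] a b → pvRel adjacency E [] b a) :
    ∀ (l : List Int), (∀ i ∈ l, i ∈ E) →
    ∀ (p : PySem.Dict Int Int) (h : Int → Nat), UFInv adjacency E p h →
    ∃ h', UFInv adjacency E (l.foldl (pvUnionStep adjacency (E.length + 1)) p) h' ∧
      (∀ x ∈ E, ∀ y ∈ E, pvRoot p E x = pvRoot p E y →
        pvRoot (l.foldl (pvUnionStep adjacency (E.length + 1)) p) E x =
        pvRoot (l.foldl (pvUnionStep adjacency (E.length + 1)) p) E y) ∧
      (∀ i ∈ l, ∀ nb ∈ pvNbrs adjacency i, nb ∈ E →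
        pvRoot (l.foldl (pvUnionStep adjacency (E.length + 1)) p) E i =
        pvRoot (l.foldl (pvUnionStep adjacency (E.length + 1)) p) E nb) := by
  intro l
  induction l with
  | nil =>
    intro _ p h hInv
    exact ⟨h, hInv, fun x _ y _ hxy => hxy, by simp⟩
  | cons i t ih =>
    intro hl p h hInv
    have hi : i ∈ E := hl i (by simp)
    obtain ⟨h1, inv1, mono1, edges1⟩ :=
      pvUnionInner adjacency E hsym i hi (pvNbrs adjacency i) (fun nb h => h) p h hInv
    rw [List.foldl_cons]
    obtain ⟨h2, inv2, mono2, edges2⟩ := ih (fun j hj => hl j (by simp [hj]))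
      (pvUnionStep adjacency (E.length + 1) p i) h1 (by exact inv1)
    refine ⟨h2, inv2, ?_, ?_⟩
    · intro x hx y hy hxy
      exact mono2 x hx y hy (mono1 x hx y hy hxy)
    · intro i' hi' nb hnb hnbE
      rcases List.mem_cons.mp hi' with rfl | hmem
      · exact mono2 i' hi nb hnbE (edges1 nb hnb hnbE)
      · exact edges2 i' hmem nb hnb hnbE

-- the initial dict {i: i for i in elk}
theorem pvP0_getD (l : List Int) :
    ∀ (d : PySem.Dict Int Int), (∀ x : Int, pfD d x = x) →
    ∀ x : Int, pfD (l.foldl (fun d i => d.insert i i) d) x = x := by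
  induction l with
  | nil => intro d hd x; exact hd x
  | cons i t ih =>
    intro d hd x
    refine ih (d.insert i i) ?_ x
    intro y
    simp only [pfD, PySem.Dict.getD_insert]
    split_ifs with hy
    · exact hy.symm ▸ rfl
    · exact hd y

theorem pvP0_contains (l : List Int) :
    ∀ (d : PySem.Dict Int Int) (x : Int),
      ((l.foldl (fun d i => d.insert i i) d).contains x = true ↔ (d.contains x = true ∨ x ∈ l)) := by
  induction l with
  | nil => intro d x; simp
  | cons i t ih =>
    intro d x
    rw [List.foldl_cons, ih]
    simp [PySem.Dict.contains_insert]
    tauto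

-- the reach-classes within a class-closed remaining list R are the rootF-classes
theorem pvReachR_iff_class (adjacency : List (Int × List Int)) (E R : List Int)
    (rootF : Int → Int)
    (hconn : ∀ x ∈ E, ∀ y ∈ E, (rootF x = rootF y ↔ pvReach adjacency E [] x y))
    (hRE : ∀ x ∈ R, x ∈ E)
    (hclosed : ∀ x ∈ R, ∀ y ∈ E, rootF y = rootF x → y ∈ R)
    (i : Int) (hiR : i ∈ R) :
    ∀ x, pvReach adjacency R [] i x ↔ (x ∈ E ∧ rootF x = rootF i) := by
  have hiE : i ∈ E := hRE i hiR
  intro x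
  constructor
  · intro hreach
    have hE : pvReach adjacency E [] i x :=
      Relation.ReflTransGen.mono (fun a b hr => ⟨hr.1, hRE _ hr.2.1, hr.2.2⟩) hreach
    exact ⟨pvReach_mem adjacency E i x hiE hE, ((hconn i hiE x (pvReach_mem adjacency E i x hiE hE)).mpr hE).symm⟩
  · rintro ⟨hxE, hrx⟩
    have hE : pvReach adjacency E [] i x := (hconn i hiE x hxE).mp hrx.symm
    clear hrx hxE
    induction hE with
    | refl => exact Relation.ReflTransGen.refl
    | @tail b c hprev hstep ih =>
      have hcE : c ∈ E := hstep.2.1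
      have hcR : c ∈ R := hclosed i hiR c hcE
        ((hconn i hiE c hcE).mpr (Relation.ReflTransGen.tail hprev hstep)).symm
      exact Relation.ReflTransGen.tail ih ⟨hstep.1, hcR, hstep.2.2⟩

def pvScoreOf (n : Int) : Int := if n = 2 ∨ n = 5 then 5 else if n = 9 then 13 else 0

-- A's score-accumulation step is adding the table value of the component's size
theorem pvStepA_eq (score : Int) (comp : List Int) :
    (if (⟨[((2:Int), (5:Int)), (5, 5), (9, 13)]⟩ : PySem.Dict Int Int).contains (comp.length : Int) then
        score + (⟨[((2:Int), (5:Int)), (5, 5), (9, 13)]⟩ : PySem.Dict Int Int).getD (comp.length : Int) 0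
      else score) = score + pvScoreOf (comp.length : Int) := by
  generalize (comp.length : Int) = n
  by_cases h2 : n = 2
  · subst h2; simp [pvScoreOf, PySem.Dict.contains, PySem.Dict.getD, PySem.Dict.get?]
  by_cases h5 : n = 5
  · subst h5; simp [pvScoreOf, PySem.Dict.contains, PySem.Dict.getD, PySem.Dict.get?]
  by_cases h9 : n = 9
  · subst h9; simp [pvScoreOf, PySem.Dict.contains, PySem.Dict.getD, PySem.Dict.get?]
  have h2' : ¬((2 : Int) = n) := fun h => h2 h.symm
  have h5' : ¬((5 : Int) = n) := fun h => h5 h.symm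
  have h9' : ¬((9 : Int) = n) := fun h => h9 h.symm
  simp [pvScoreOf, PySem.Dict.contains, h2, h5, h9, h2', h5', h9']

-- B's table lookup is the same table value
theorem pvGetTable (n : Int) :
    PySem.Dict.getD (⟨[((2:Int), (5:Int)), (5, 5), (9, 13)]⟩ : PySem.Dict Int Int) n 0 = pvScoreOf n := by
  by_cases h2 : n = 2
  · subst h2; simp [pvScoreOf, PySem.Dict.getD, PySem.Dict.get?]
  by_cases h5 : n = 5
  · subst h5; simp [pvScoreOf, PySem.Dict.getD, PySem.Dict.get?]
  by_cases h9 : n = 9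
  · subst h9; simp [pvScoreOf, PySem.Dict.getD, PySem.Dict.get?]
  have h2' : ¬((2 : Int) = n) := fun h => h2 h.symm
  have h5' : ¬((5 : Int) = n) := fun h => h5 h.symm
  have h9' : ¬((9 : Int) = n) := fun h => h9 h.symm
  simp [pvScoreOf, PySem.Dict.getD, PySem.Dict.get?, h2, h5, h9, h2', h5', h9']

-- B's scoring loop as a sum over the roots
theorem pvBfold (rootF : Int → Int) (g : Int → Int) :
    ∀ (l : List Int) (s : Int),
      l.foldl (fun score i => if rootF i = i then score + g i else score) s
        = s + ((l.filter (fun i => decide (rootF i = i))).map g).sum := by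
  intro l
  induction l with
  | nil => intro s; simp
  | cons i t ih =>
    intro s
    rw [List.foldl_cons]
    by_cases hr : rootF i = i
    · rw [if_pos hr, ih, List.filter_cons_of_pos (by simpa using hr)]
      simp; ring
    · rw [if_neg hr, ih, List.filter_cons_of_neg (by simpa using hr)]

-- the main peeling theorem: A's component-size scores sum to the per-root class scores
theorem pvAscore (adjacency : List (Int × List Int)) (E : List Int) (hEnd : E.Nodup)
    (rootF : Int → Int)
    (hrootmem : ∀ x ∈ E, rootF x ∈ E)
    (hrootidem : ∀ x ∈ E, rootF (rootF x) = rootF x)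
    (hconn : ∀ x ∈ E, ∀ y ∈ E, (rootF x = rootF y ↔ pvReach adjacency E [] x y)) :
    ∀ (fuel : Nat) (R : List Int), R.Nodup → (∀ x ∈ R, x ∈ E) →
      (∀ x ∈ R, ∀ y ∈ E, rootF y = rootF x → y ∈ R) → R.length ≤ fuel →
      ((pvFindCCA adjacency fuel R).map (fun c => pvScoreOf (c.length : Int))).sum
        = ((R.filter (fun i => decide (rootF i = i))).map
            (fun i => pvScoreOf ((E.countP (fun j => rootF j == i)) : Int))).sum := by
  intro fuel
  induction fuel with
  | zero =>
    intro R hnd hRE hclosed hlen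
    cases R with
    | nil => simp [pvFindCCA]
    | cons i rest => simp only [List.length_cons] at hlen; omega
  | succ fuel ih =>
    intro R hnd hRE hclosed hlen
    cases R with
    | nil => simp [pvFindCCA]
    | cons i rest =>
      have hiE : i ∈ E := hRE i (by simp)
      set C := pvBfsA adjacency (i :: rest) (2 * (i :: rest).length + 1) [i] [i] with hC
      have hA := pvBfsA_char adjacency (i :: rest) [] i
        (2 * (i :: rest).length + 1) [i] [i]
        (by have := List.countP_le_length
              (p := fun x => decide (x ∉ ([i] : List Int))) (l := i :: rest)
            simp only [List.length_cons, List.length_nil] at this ⊢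
            omega)
        (by simp) (by simp) (by simp) (by simp) (by simp)
        (by intro x hx; simp at hx; subst hx; exact Or.inr Relation.ReflTransGen.refl)
        (by intro x hx hx2; simp at hx; simp [hx] at hx2)
      obtain ⟨hCnd, hCmem⟩ := hA
      have hchar := pvReachR_iff_class adjacency E (i :: rest) rootF hconn hRE hclosed i (by simp)
      have hCiff : ∀ x, x ∈ C ↔ (x ∈ E ∧ rootF x = rootF i) := by
        intro x
        rw [← hchar x, hCmem x]
        simp
      have hr0E : rootF i ∈ E := hrootmem i hiE
      have hr0fix : rootF (rootF i) = rootF i := hrootidem i hiE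
      have hsize : C.length = E.countP (fun j => rootF j == rootF i) := by
        have hperm : C.Perm (E.filter (fun j => decide (rootF j = rootF i))) := by
          refine (List.perm_ext_iff_of_nodup hCnd (hEnd.filter _)).mpr ?_
          intro a
          rw [hCiff a, List.mem_filter]
          simp
        rw [hperm.length_eq, ← List.countP_eq_length_filter]
        refine List.countP_congr ?_
        intro a _
        simp
      rw [show pvFindCCA adjacency (fuel + 1) (i :: rest) =
          PySem.List.sorted C (fun x => x) false ::
            pvFindCCA adjacency fuel ((i :: rest).filter (fun x => decide (x ∉ C)))
          from by simp only [pvFindCCA]; rw [← hC]]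
      rw [List.map_cons, List.sum_cons]
      set R' := (i :: rest).filter (fun x => decide (x ∉ C)) with hR'
      have hR'nd : R'.Nodup := hnd.filter _
      have hR'E : ∀ x ∈ R', x ∈ E := fun x hx => hRE x (List.mem_of_mem_filter hx)
      have hR'closed : ∀ x ∈ R', ∀ y ∈ E, rootF y = rootF x → y ∈ R' := by
        intro x hx y hyE hre
        have hxR : x ∈ i :: rest := List.mem_of_mem_filter hx
        have hxnC : x ∉ C := by
          have := List.of_mem_filter hx
          simpa using this
        have hxE : x ∈ E := hRE x hxR
        have hxne : rootF x ≠ rootF i := fun e => hxnC ((hCiff x).mpr ⟨hxE, e⟩)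
        refine List.mem_filter.mpr ⟨hclosed x hxR y hyE hre, ?_⟩
        simp only [decide_eq_true_eq]
        intro hyC
        exact hxne (by rw [← hre]; exact ((hCiff y).mp hyC).2)
      have hiC : i ∈ C := (hCiff i).mpr ⟨hiE, rfl⟩
      have hR'len : R'.length ≤ fuel := by
        have he : R' = rest.filter (fun x => decide (x ∉ C)) := by
          rw [hR', List.filter_cons_of_neg (by simpa using hiC)]
        rw [he]
        have := List.length_filter_le (fun x => decide (x ∉ C)) rest
        simp only [List.length_cons] at hlen
        omega
      rw [ih R' hR'nd hR'E hR'closed hR'len]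
      have hr0R : rootF i ∈ i :: rest := hclosed i (by simp) (rootF i) hr0E hr0fix
      have hr0C : rootF i ∈ C := (hCiff _).mpr ⟨hr0E, hr0fix⟩
      have hr0nR' : rootF i ∉ R' := by
        intro hmem
        have := List.of_mem_filter hmem
        simp only [decide_eq_true_eq] at this
        exact this hr0C
      have hfsplit : ((i :: rest).filter (fun j => decide (rootF j = j))).Perm
          (rootF i :: R'.filter (fun j => decide (rootF j = j))) := by
        refine (List.perm_ext_iff_of_nodup (hnd.filter _) ?_).mpr ?_
        · exact List.nodup_cons.mpr
            ⟨fun hmem => hr0nR' (List.mem_of_mem_filter hmem), hR'nd.filter _⟩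
        · intro a
          simp only [List.mem_filter, List.mem_cons, decide_eq_true_eq]
          constructor
          · rintro ⟨haR, haroot⟩
            by_cases he : rootF a = rootF i
            · left; rw [← haroot, he]
            · right
              refine ⟨List.mem_filter.mpr ⟨List.mem_cons.mpr haR, ?_⟩, haroot⟩
              simp only [decide_eq_true_eq]
              intro haC
              exact he ((hCiff a).mp haC).2
          · rintro (rfl | ⟨haR', haroot⟩)
            · exact ⟨List.mem_cons.mp hr0R, hr0fix⟩
            · exact ⟨List.mem_cons.mp (List.mem_of_mem_filter haR'), haroot⟩
      rw [(hfsplit.map (fun i' => pvScoreOf ((E.countP (fun j => rootF j == i')) : Int))).sum_eq]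
      rw [List.map_cons, List.sum_cons]
      have hslen : (PySem.List.sorted C (fun x => x) false).length = C.length :=
        PySem.List.length_sorted C (fun x => x) false
      rw [hslen, hsize]

-- the elk-index list is strictly increasing, hence duplicate-free and its own set
theorem pvElk_pairwise (animals : List String) :
    (((PySem.List.enumerate animals 0).filter (fun p => p.2 == "elk")).map
      (fun p => p.1)).Pairwise (· < ·) := by
  rw [List.pairwise_map]
  exact (PySem.List.pairwise_lt_enumerate animals 0).filter _

-- ===== VERDICT (by name: the statement is the Claim_ definition above) =====
theorem score_elk_spec : Claim_equal_score_elk := by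
  intro animals adjacency centroids _hdom hpre
  unfold Spec_score_elk score_elk score_elk_alt
  have hlt := pvElk_pairwise animals
  set L := ((PySem.List.enumerate animals 0).filter (fun p => p.2 == "elk")).map
    (fun p => p.1) with hLdef
  have hLnd : L.Nodup := hlt.imp ne_of_lt
  have hset : PySem.Set.ofList L = L := PySem.Set.ofList_eq_self_of_nodup L hLnd
  dsimp only
  rw [hset]
  by_cases hL : L = []
  · rw [if_pos hL, hL]
    rfl
  · rw [if_neg hL]
    have hsym : ∀ a b, a ∈ L → pvRel adjacency L [] a b → pvRel adjacency L [] b a := by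
      intro a b ha hr
      exact ⟨hpre a ha b hr.2.1 hr.1, ha, by simp⟩
    set p0 : PySem.Dict Int Int := L.foldl (fun d i => d.insert i i) ⟨[]⟩ with hp0
    have hpf0 : ∀ x : Int, pfD p0 x = x := pvP0_getD L ⟨[]⟩ (fun x => rfl)
    have hK0 : ∀ x : Int, p0.contains x = true ↔ x ∈ L := by
      intro x
      rw [hp0, pvP0_contains]
      constructor
      · rintro (h | h)
        · rw [PySem.Dict.contains_iff_mem_keys] at h
          simp [PySem.Dict.keys] at h
        · exact h
      · exact fun h => Or.inr h
    have UF0 : UFInv adjacency L p0 (fun _ => 0) :=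
      ⟨hK0, fun x hx => by rw [hpf0]; exact hx,
        fun x hx => by rw [hpf0]; exact Relation.ReflTransGen.refl,
        fun x hx hne => absurd (hpf0 x) hne⟩
    obtain ⟨hF, ⟨KF, I1F, I2F, I3F⟩, _, edgesF⟩ :=
      pvUnionOuter adjacency L hsym L (fun i hi => hi) p0 (fun _ => 0) UF0
    set pF := L.foldl (pvUnionStep adjacency (L.length + 1)) p0 with hpF
    have hspec : ∀ x ∈ L, pvRoot pF L x ∈ L ∧ pfD pF (pvRoot pF L x) = pvRoot pF L x ∧
        pvReach adjacency L [] x (pvRoot pF L x) := by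
      intro x hx
      exact pvFind_spec adjacency L pF hF I1F I2F I3F (L.length + 1) x hx
        (by have := pvM_le L hF x; omega)
    have hconn : ∀ x ∈ L, ∀ y ∈ L,
        (pvRoot pF L x = pvRoot pF L y ↔ pvReach adjacency L [] x y) := by
      intro x hx y hy
      constructor
      · intro he
        obtain ⟨hx1, _, hx3⟩ := hspec x hx
        obtain ⟨hy1, _, hy3⟩ := hspec y hy
        have hback : pvReach adjacency L [] (pvRoot pF L y) y :=
          pvReach_symm adjacency L hsym y _ hy hy3
        exact Relation.ReflTransGen.trans hx3 (he ▸ hback)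
      · intro hr
        have key : ∀ z, pvReach adjacency L [] x z → pvRoot pF L x = pvRoot pF L z := by
          intro z hz
          induction hz with
          | refl => rfl
          | @tail b c hprev hstep ih =>
            have hbL : b ∈ L := pvReach_mem adjacency L x b hx hprev
            exact ih.trans (edgesF b hbL c hstep.1 hstep.2.1)
        exact key y hr
    have hsteps : (fun (score : Int) (comp : List Int) =>
        if (⟨[((2:Int), (5:Int)), (5, 5), (9, 13)]⟩ : PySem.Dict Int Int).contains (comp.length : Int) then
          score + (⟨[((2:Int), (5:Int)), (5, 5), (9, 13)]⟩ : PySem.Dict Int Int).getD (comp.length : Int) 0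
        else score) = (fun score comp => score + pvScoreOf (comp.length : Int)) :=
      funext fun sc => funext fun c => pvStepA_eq sc c
    rw [hsteps, PySem.List.foldl_add]
    have hmain := pvAscore adjacency L hLnd (fun z => pvFind pF (L.length + 1) z)
      (fun x hx => (hspec x hx).1)
      (fun x hx => pvRoot_fix L pF (pvRoot pF L x) (hspec x hx).2.1)
      hconn L.length L hLnd (fun x hx => hx) (fun _ _ y hy _ => hy) le_rfl
    rw [hmain]
    rw [pvBfold (fun x => pvFind pF (L.length + 1) x)
      (fun i => PySem.Dict.getD (⟨[((2:Int), (5:Int)), (5, 5), (9, 13)]⟩ : PySem.Dict Int Int)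
        ((L.countP (fun j => pvFind pF (L.length + 1) j == i) : Int)) 0) L 0]
    have hg : (fun i => PySem.Dict.getD (⟨[((2:Int), (5:Int)), (5, 5), (9, 13)]⟩ : PySem.Dict Int Int)
        ((L.countP (fun j => pvFind pF (L.length + 1) j == i) : Int)) 0)
        = fun i => pvScoreOf ((L.countP (fun j => pvFind pF (L.length + 1) j == i) : Int)) :=
      funext fun i => pvGetTable _
    rw [hg]
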